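-- pv_equiv track=rewrite | github.com/Ag3497120/verantyx-v6 | arc/grid.py | tile_checkerboard
-- ===== SOURCE A (Python) =====
-- from typing import List, Tuple, Optional, Set
--
-- Grid = List[List[int]]
--
-- def grid_shape(g: Grid) -> Tuple[int, int]:
--     """(height, width)"""
--     if not g:
--         return (0, 0)
--     return (len(g), len(g[0]))
--
-- def flip_h(g: Grid) -> Grid:
--     """Flip horizontally (left-right)"""
--     return [row[::-1] for row in g]
--
-- def flip_v(g: Grid) -> Grid:
--     """Flip vertically (top-bottom)"""
--     return g[::-1]
--
-- def tile_checkerboard(g: Grid, repeat_h: int, repeat_w: int) -> Grid: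
--     """Tile with checkerboard flip pattern"""
--     h, w = grid_shape(g)
--     g_fh = flip_h(g)
--     g_fv = flip_v(g)
--     g_fhv = flip_h(flip_v(g))
--     variants = [[g, g_fh], [g_fv, g_fhv]]
--
--     result = []
--     for rr in range(repeat_h):
--         for r in range(h):
--             row = []
--             for cr in range(repeat_w):
--                 src = variants[rr % 2][cr % 2]
--                 row.extend(src[r])
--             result.append(row)
--     return result
-- ===== SOURCE B (Python) =====
-- def tile_checkerboard(g, repeat_h, repeat_w):
--     """Tile with checkerboard flip pattern"""
--     k = max(repeat_w, 0)
--     result = []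
--     for rr in range(repeat_h):
--         for base in (g if rr % 2 == 0 else g[::-1]):
--             result.append((base + base[::-1]) * (k // 2) + (base if k % 2 else []))
--     return result
-- ===== Notes on version B (the rewrite author's own statement) =====
-- stated objective: simpler
-- what changed: B drops the four precomputed flipped grid variants, the 2x2 variant table and the triple index loop; it iterates the rows directly (g or g reversed per tile-row parity) and builds each output row in closed form as (base + reversed base) repeated repeat_w//2 times plus a trailing base when repeat_w is odd.
import Mathlib
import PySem

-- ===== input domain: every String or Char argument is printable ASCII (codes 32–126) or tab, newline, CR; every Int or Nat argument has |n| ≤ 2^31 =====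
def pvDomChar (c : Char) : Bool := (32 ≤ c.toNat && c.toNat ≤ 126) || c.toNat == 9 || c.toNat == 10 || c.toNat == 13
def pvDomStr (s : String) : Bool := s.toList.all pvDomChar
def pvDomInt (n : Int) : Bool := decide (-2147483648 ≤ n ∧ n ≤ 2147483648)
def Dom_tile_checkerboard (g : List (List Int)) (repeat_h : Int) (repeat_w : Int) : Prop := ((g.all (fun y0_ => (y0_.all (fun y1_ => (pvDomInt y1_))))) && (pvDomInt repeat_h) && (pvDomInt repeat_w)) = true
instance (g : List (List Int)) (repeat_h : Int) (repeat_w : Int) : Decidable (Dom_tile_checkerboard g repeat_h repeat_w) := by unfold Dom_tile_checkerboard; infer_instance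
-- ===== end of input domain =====

-- B replaces A's four precomputed flipped grids and 2×2 variant table plus triple index
-- loop by iterating the rows directly (g or g reversed per tile-row parity) and building
-- each output row in closed form as (base ++ base.reverse) repeated, for simplicity.

-- ===== PORT A =====
-- flip_h
def pvFlipH (g : List (List Int)) : List (List Int) := g.map List.reverse
-- flip_v
def pvFlipV (g : List (List Int)) : List (List Int) := g.reverse

def tile_checkerboard (g : List (List Int)) (repeat_h : Int) (repeat_w : Int) : List (List Int) :=
  let h : Int := g.length            -- grid_shape: w = len(g[0]) is computed but unused
  let g_fh := pvFlipH g
  let g_fv := pvFlipV g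
  let g_fhv := pvFlipH (pvFlipV g)
  let variants := [[g, g_fh], [g_fv, g_fhv]]
  (PySem.List.pyRange 0 repeat_h 1).foldl (fun result rr =>
    (PySem.List.pyRange 0 h 1).foldl (fun result r =>
      let row := (PySem.List.pyRange 0 repeat_w 1).foldl (fun row cr =>
        -- variants[rr % 2][cr % 2] and src[r]: always in range, pyGetD [] is exact here
        let src := PySem.List.pyGetD (PySem.List.pyGetD variants (PySem.Int.mod rr 2) []) (PySem.Int.mod cr 2) []
        row ++ PySem.List.pyGetD src r []) []
      result ++ [row]) result) []

-- ===== PORT B =====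
def tile_checkerboard_alt (g : List (List Int)) (repeat_h : Int) (repeat_w : Int) : List (List Int) :=
  let k := max repeat_w 0
  (PySem.List.pyRange 0 repeat_h 1).foldl (fun result rr =>
    (if PySem.Int.mod rr 2 == 0 then g else g.reverse).foldl (fun result base =>
      result ++ [(List.replicate (PySem.Int.floordiv k 2).toNat (base ++ base.reverse)).flatten
                 ++ (if PySem.Int.mod k 2 == 1 then base else [])]) result) []

-- ===== PRECONDITION & SPEC =====
def Spec_tile_checkerboard (g : List (List Int)) (repeat_h : Int) (repeat_w : Int) (out : List (List Int)) : Prop := out = tile_checkerboard_alt g repeat_h repeat_w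
instance (g : List (List Int)) (repeat_h : Int) (repeat_w : Int) (out : List (List Int)) : Decidable (Spec_tile_checkerboard g repeat_h repeat_w out) := by unfold Spec_tile_checkerboard; infer_instance

-- ===== CLAIM (what is proved, stated in full; the proofs are below) =====
def Claim_equal_tile_checkerboard : Prop := ∀ (g : List (List Int)) (repeat_h : Int) (repeat_w : Int), Dom_tile_checkerboard g repeat_h repeat_w → Spec_tile_checkerboard g repeat_h repeat_w (tile_checkerboard g repeat_h repeat_w)

-- ===== LEMMAS AND PROOFS =====

-- the inner repeat_w loop of A, written as a function of the (unflipped) row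
def pvRowFold (base : List Int) (w : Int) : List Int :=
  (PySem.List.pyRange 0 w 1).foldl (fun row cr =>
    row ++ (if PySem.Int.mod cr 2 == 0 then base else base.reverse)) []

-- B's closed form for one output row
def pvRowB (base : List Int) (k : Int) : List Int :=
  (List.replicate (PySem.Int.floordiv k 2).toNat (base ++ base.reverse)).flatten
    ++ (if PySem.Int.mod k 2 == 1 then base else [])

theorem pvRowFold_nat (base : List Int) (n : Nat) :
    pvRowFold base n = pvRowB base n := by
  induction n with
  | zero => simp [pvRowFold, pvRowB, PySem.Int.floordiv, PySem.Int.mod]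
  | succ n ih =>
    have hstep : ((n : Int) + 1) = ((n + 1 : Nat) : Int) := by push_cast; ring
    have h1 : PySem.List.pyRange 0 ((n + 1 : Nat) : Int) 1
        = PySem.List.pyRange 0 (n : Nat) 1 ++ [(n : Int)] := by
      rw [← hstep]; exact PySem.List.pyRange_one_succ_right (by positivity)
    have hm : PySem.Int.mod (n : Int) 2 = ((n % 2 : Nat) : Int) := by
      exact_mod_cast PySem.Int.mod_natCast n 2
    have hm' : PySem.Int.mod ((n : Int) + 1) 2 = (((n + 1) % 2 : Nat) : Int) := by
      rw [hstep]; exact_mod_cast PySem.Int.mod_natCast (n + 1) 2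
    have hd : PySem.Int.floordiv (n : Int) 2 = ((n / 2 : Nat) : Int) := by
      exact_mod_cast PySem.Int.floordiv_natCast n 2
    have hd' : PySem.Int.floordiv ((n : Int) + 1) 2 = (((n + 1) / 2 : Nat) : Int) := by
      rw [hstep]; exact_mod_cast PySem.Int.floordiv_natCast (n + 1) 2
    unfold pvRowFold at ih ⊢
    rw [h1, List.foldl_append, ih]
    simp only [List.foldl]
    rw [← hstep]
    simp only [pvRowB, hm, hm', hd, hd']
    rcases Nat.even_or_odd n with he | ho
    · have h2 : n % 2 = 0 := Nat.even_iff.mp he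
      have h3 : (n + 1) % 2 = 1 := by omega
      have h4 : (n + 1) / 2 = n / 2 := by omega
      simp [h2, h3, h4]
    · have h2 : n % 2 = 1 := Nat.odd_iff.mp ho
      have h3 : (n + 1) % 2 = 0 := by omega
      have h4 : (n + 1) / 2 = n / 2 + 1 := by omega
      simp only [h2, h3, h4]
      have h5 : ((n : Int) / 2 + 1).toNat = ((n : Int) / 2).toNat + 1 := by omega
      simp only [Int.toNat_natCast]
      simp [List.replicate_succ']

theorem pvRowFold_eq (base : List Int) (w : Int) :
    pvRowFold base w = pvRowB base (max w 0) := by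
  rcases le_or_gt w 0 with hle | hpos
  · have h0 : max w 0 = ((0 : Nat) : Int) := by omega
    rw [h0, ← pvRowFold_nat]
    unfold pvRowFold
    rw [PySem.List.pyRange_one_eq_nil hle, PySem.List.pyRange_one_eq_nil (by omega)]
  · have hmax : max w 0 = ((w.toNat : Nat) : Int) := by omega
    have hw : w = ((w.toNat : Nat) : Int) := by omega
    rw [hmax]
    conv_lhs => rw [hw]
    exact pvRowFold_nat base w.toNat

-- one tile-row block of A equals the corresponding block of B
theorem pvBlock_eq (rows : List (List Int)) (repeat_w : Int) (result : List (List Int)) :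
    (PySem.List.pyRange 0 (rows.length : Int) 1).foldl (fun result r =>
        result ++ [(PySem.List.pyRange 0 repeat_w 1).foldl (fun row cr =>
          row ++ PySem.List.pyGetD
            (PySem.List.pyGetD [rows, rows.map List.reverse] (PySem.Int.mod cr 2) []) r []) []]) result
    = rows.foldl (fun result base => result ++ [pvRowB base (max repeat_w 0)]) result := by
  have hA : ∀ r : Int, (PySem.List.pyRange 0 repeat_w 1).foldl (fun row cr =>
        row ++ PySem.List.pyGetD
          (PySem.List.pyGetD [rows, rows.map List.reverse] (PySem.Int.mod cr 2) []) r []) []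
      = pvRowB (PySem.List.pyGetD rows r []) (max repeat_w 0) := by
    intro r
    have hrev : PySem.List.pyGetD (rows.map List.reverse) r []
        = (PySem.List.pyGetD rows r []).reverse := by
      simpa using PySem.List.pyGetD_map List.reverse rows r []
    rw [← pvRowFold_eq]
    unfold pvRowFold
    congr 1
    funext row cr
    rcases PySem.Int.mod_two_eq cr with h | h <;> rw [h]
    · rw [show PySem.List.pyGetD [rows, rows.map List.reverse] (0 : Int) [] = rows from rfl]
      simp
    · rw [show PySem.List.pyGetD [rows, rows.map List.reverse] (1 : Int) []
            = rows.map List.reverse from rfl, hrev]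
      simp
  calc (PySem.List.pyRange 0 (rows.length : Int) 1).foldl (fun result r =>
        result ++ [(PySem.List.pyRange 0 repeat_w 1).foldl (fun row cr =>
          row ++ PySem.List.pyGetD
            (PySem.List.pyGetD [rows, rows.map List.reverse] (PySem.Int.mod cr 2) []) r []) []]) result
      = result ++ (PySem.List.pyRange 0 (rows.length : Int) 1).map
          (fun r => pvRowB (PySem.List.pyGetD rows r []) (max repeat_w 0)) := by
        rw [PySem.List.foldl_append_singleton_eq_map
          (fun r => (PySem.List.pyRange 0 repeat_w 1).foldl (fun row cr =>
            row ++ PySem.List.pyGetD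
              (PySem.List.pyGetD [rows, rows.map List.reverse] (PySem.Int.mod cr 2) []) r []) [])]
        congr 1
        exact List.map_congr_left (fun r _ => hA r)
    _ = result ++ rows.map (fun base => pvRowB base (max repeat_w 0)) := by
        congr 1
        conv_rhs => rw [← PySem.List.map_pyGetD_pyRange_zero' rows ([] : List Int)]
        rw [List.map_map]
        rfl
    _ = rows.foldl (fun result base => result ++ [pvRowB base (max repeat_w 0)]) result := by
        rw [PySem.List.foldl_append_singleton_eq_map]

-- ===== VERDICT (by name: the statement is the Claim_ definition above) =====
theorem tile_checkerboard_spec : Claim_equal_tile_checkerboard := by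
  intro g repeat_h repeat_w _
  unfold Spec_tile_checkerboard tile_checkerboard tile_checkerboard_alt
  simp only []
  congr 1
  funext result rr
  rcases PySem.Int.mod_two_eq rr with h2 | h2 <;> rw [h2]
  · have hv : PySem.List.pyGetD [[g, pvFlipH g], [pvFlipV g, pvFlipH (pvFlipV g)]]
        (0 : Int) [] = [g, pvFlipH g] := rfl
    simp only [hv]
    simp only [pvFlipH]
    rw [show (if ((0 : Int) == 0 : Bool) = true then g else g.reverse) = g from rfl]
    have hb := pvBlock_eq g repeat_w result
    unfold pvRowB at hb
    exact hb
  · have hv : PySem.List.pyGetD [[g, pvFlipH g], [pvFlipV g, pvFlipH (pvFlipV g)]]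
        (1 : Int) [] = [pvFlipV g, pvFlipH (pvFlipV g)] := rfl
    simp only [hv]
    simp only [pvFlipH, pvFlipV]
    rw [show (if ((1 : Int) == 0 : Bool) = true then g else g.reverse) = g.reverse from rfl]
    rw [show ((g.length : Nat) : Int) = ((g.reverse.length : Nat) : Int) by simp]
    have hb := pvBlock_eq g.reverse repeat_w result
    unfold pvRowB at hb
    exact hb
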